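-- pv_equiv track=rewrite | github.com/MarkusRognlien/2048 | 2048.py | process_move
-- ===== SOURCE A (Python) =====
-- DIM = 4
--
-- def fix_row(row):
--     new_row = []
--     row = [x for x in row if x != 0]
--     for col in range(len(row) - 1):
--         if row[col + 1] == row[col]:
--             new_row.append(row[col] * 2)
--             row[col + 1] = 0
--         else:
--             if row[col] != 0:
--                 new_row.append(row[col])
--             if col == len(row) - 2:
--                 new_row.append(row[col + 1])
--     if len(row) == 1:
--         new_row = row
--     return new_row + [0] * (DIM - len(new_row))
--
-- def process_move(grid, move):
--     if move == 0:
--         new_board = [fix_row(row) for row in grid]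
--     elif move == 1:
--         new_board = [list(fix_row(row.__reversed__()).__reversed__()) for row in rotate(grid)]
--         for i in range(3):
--             new_board = rotate(new_board)
--     elif move == 2:
--         new_board = [list(fix_row(row.__reversed__()).__reversed__()) for row in grid]
--     else:
--         new_board = [fix_row(row) for row in rotate(grid)]
--         for i in range(3):
--             new_board = rotate(new_board)
--
--     if new_board == grid:
--         valid = False
--     else:
--         valid = True
--
--     return new_board, valid
--
-- def rotate(grid):
--     return [list(x) for x in zip(*grid[::-1])]
-- ===== SOURCE B (Python) =====
-- DIM = 4
--
-- def merge_left(row):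
--     tiles = [x for x in row if x != 0]
--     out = []
--     i = 0
--     while i < len(tiles):
--         if i + 1 < len(tiles) and tiles[i + 1] == tiles[i]:
--             out.append(tiles[i] * 2)
--             i += 2
--         else:
--             out.append(tiles[i])
--             i += 1
--     return out + [0] * (DIM - len(out))
--
-- def merge_right(row):
--     return merge_left(row[::-1])[::-1]
--
-- def rot(grid):
--     return [list(x) for x in zip(*grid[::-1])]
--
-- def process_move(grid, move):
--     f = merge_right if move == 1 or move == 2 else merge_left
--     if move == 0 or move == 2:
--         new_board = [f(r) for r in grid]
--     else:
--         new_board = rot(rot(rot([f(r) for r in rot(grid)])))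
--     return new_board, new_board != grid
-- ===== Notes on version B (the rewrite author's own statement) =====
-- stated objective: simpler
-- what changed: fix_row's index loop with in-place zeroing of merged cells is replaced by a two-pointer merge over the zero-free tiles, and A's four rotate/__reversed__ branches are folded into a direction/axis dispatch with a single merge function.
import Mathlib
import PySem

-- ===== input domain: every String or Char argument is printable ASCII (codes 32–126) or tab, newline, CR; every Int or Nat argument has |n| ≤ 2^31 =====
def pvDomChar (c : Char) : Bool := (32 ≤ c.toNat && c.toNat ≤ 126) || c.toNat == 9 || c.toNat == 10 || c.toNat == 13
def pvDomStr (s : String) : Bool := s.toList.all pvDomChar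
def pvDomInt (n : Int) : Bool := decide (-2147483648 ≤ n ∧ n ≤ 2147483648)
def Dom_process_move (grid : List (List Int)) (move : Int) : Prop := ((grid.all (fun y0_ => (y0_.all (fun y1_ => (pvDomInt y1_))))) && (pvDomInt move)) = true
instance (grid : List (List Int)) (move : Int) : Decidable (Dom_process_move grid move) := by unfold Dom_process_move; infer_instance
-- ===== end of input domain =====

-- B replaces fix_row's index loop with in-place zeroing by a two-pointer merge over the
-- zero-free tiles, and folds A's four rotate/__reversed__ branches into a direction/axis
-- dispatch with a single merge function (objective: simpler).

-- ===== PORT A =====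

-- zip(*rows): transpose truncating to the shortest row (exact for Python's zip on lists)
def zipT (rows : List (List Int)) : List (List Int) :=
  match h : rows with
  | [] => []
  | _ :: _ =>
    if rows.all (fun r => r ≠ []) then
      rows.map (fun r => r.headD 0) :: zipT (rows.map (fun r => r.drop 1))
    else []
  termination_by (rows.headD []).length
  decreasing_by
    subst h
    rename_i hall
    simp only [List.headD_cons, List.all_cons, Bool.and_eq_true, decide_eq_true_eq] at *
    obtain ⟨h1, _⟩ := hall
    cases ‹List Int› with
    | nil => exact absurd rfl h1
    | cons a t => simp

def rotate (grid : List (List Int)) : List (List Int) :=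
  zipT grid.reverse

-- one iteration of fix_row's loop body; the mutation row[col+1] = 0 becomes List.set,
-- and since every index produced by range(len(row)-1) is in range, getD is exact
def fixStep (st : List Int × List Int) (col : Nat) : List Int × List Int :=
  let row := st.1
  let new_row := st.2
  if row.getD (col+1) 0 = row.getD col 0 then
    (row.set (col+1) 0, new_row ++ [row.getD col 0 * 2])
  else
    let new_row := if row.getD col 0 ≠ 0 then new_row ++ [row.getD col 0] else new_row
    let new_row := if col = row.length - 2 then new_row ++ [row.getD (col+1) 0] else new_row
    (row, new_row)

-- fix_row after 'row = [x for x in row if x != 0]'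
def fixCore (row : List Int) : List Int :=
  let st := (List.range (row.length - 1)).foldl fixStep (row, [])
  let new_row := if st.1.length = 1 then st.1 else st.2
  new_row ++ List.replicate (4 - new_row.length) 0

def fixRow (row : List Int) : List Int :=
  fixCore (row.filter (fun x => x ≠ 0))

def process_move (grid : List (List Int)) (move : Int) : List (List Int) × Bool :=
  let new_board :=
    if move = 0 then
      grid.map fixRow
    else if move = 1 then
      let nb := (rotate grid).map (fun row => (fixRow row.reverse).reverse)
      (List.range 3).foldl (fun b _ => rotate b) nb
    else if move = 2 then
      grid.map (fun row => (fixRow row.reverse).reverse)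
    else
      let nb := (rotate grid).map fixRow
      (List.range 3).foldl (fun b _ => rotate b) nb
  let valid := if new_board = grid then false else true
  (new_board, valid)

-- ===== PORT B =====

-- the two-pointer while loop of merge_left, as structural recursion on the zero-free tiles
def mergeCore : List Int → List Int
  | [] => []
  | [x] => [x]
  | x :: y :: rest => if y = x then x * 2 :: mergeCore rest else x :: mergeCore (y :: rest)

def mergeLeft (row : List Int) : List Int :=
  let out := mergeCore (row.filter (fun x => x ≠ 0))
  out ++ List.replicate (4 - out.length) 0

def mergeRight (row : List Int) : List Int :=
  (mergeLeft row.reverse).reverse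

-- [list(x) for x in zip(*grid[::-1])], the same library calls Source B makes
def rotB (grid : List (List Int)) : List (List Int) :=
  zipT grid.reverse

def process_move_alt (grid : List (List Int)) (move : Int) : List (List Int) × Bool :=
  let f := if move = 1 ∨ move = 2 then mergeRight else mergeLeft
  let new_board :=
    if move = 0 ∨ move = 2 then
      grid.map f
    else
      rotB (rotB (rotB ((rotB grid).map f)))
  (new_board, new_board != grid)

-- ===== PRECONDITION & SPEC =====

def Spec_process_move (grid : List (List Int)) (move : Int) (out : List (List Int) × Bool) : Prop := out = process_move_alt grid move
instance (grid : List (List Int)) (move : Int) (out : List (List Int) × Bool) : Decidable (Spec_process_move grid move out) := by unfold Spec_process_move; infer_instance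

-- ===== CLAIM (what is proved, stated in full; the proofs are below) =====
def Claim_equal_process_move : Prop := ∀ (grid : List (List Int)) (move : Int), Dom_process_move grid move → Spec_process_move grid move (process_move grid move)

-- ===== LEMMAS AND PROOFS =====

theorem set_append_right (p u : List Int) (k : Nat) (a : Int) :
    (p ++ u).set (p.length + k) a = p ++ u.set k a := by
  induction p with
  | nil => simp
  | cons b p ih => simpa [List.set, Nat.succ_add] using ih

theorem getD_append_at (p u : List Int) (k : Nat) (d : Int) :
    (p ++ u).getD (p.length + k) d = u.getD k d := by
  induction p with
  | nil => simp
  | cons b p ih => simpa [List.getD, Nat.succ_add] using ih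

-- evaluation of one loop iteration, phrased with getD (proved by rfl)
theorem fixStep_eval (row nr : List Int) (c : Nat) :
    fixStep (row, nr) c =
      if row.getD (c+1) 0 = row.getD c 0 then
        (row.set (c+1) 0, nr ++ [row.getD c 0 * 2])
      else
        (row,
          if c = row.length - 2 then
            (if row.getD c 0 ≠ 0 then nr ++ [row.getD c 0] else nr) ++ [row.getD (c+1) 0]
          else
            (if row.getD c 0 ≠ 0 then nr ++ [row.getD c 0] else nr)) := by
  unfold fixStep
  by_cases h1 : row.getD (c+1) 0 = row.getD c 0 <;>
    by_cases h2 : c = row.length - 2 <;> simp [h1, h2]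

-- the loop of fix_row, started at column p.length on a row p ++ u with u zero-free,
-- appends exactly mergeCore u to the accumulator
theorem fixLoop (n : Nat) : ∀ (u p acc : List Int), u.length = n → 2 ≤ n →
    (∀ x ∈ u, x ≠ 0) →
    ((List.range' p.length (n - 1)).foldl fixStep (p ++ u, acc)).2 = acc ++ mergeCore u := by
  induction n using Nat.strong_induction_on with
  | _ n IH =>
    intro u p acc hlen h2 hnz
    match u, hlen with
    | [], hl => rw [← hl] at h2; simp at h2
    | [t], hl => rw [← hl] at h2; simp at h2
    | x :: y :: rest, hlen =>
      have hx : x ≠ 0 := hnz x (by simp)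
      have hn : n = rest.length + 2 := by simpa using hlen.symm
      subst hn
      rw [show rest.length + 2 - 1 = rest.length + 1 from by omega, List.range'_succ,
        List.foldl_cons]
      have hg0 : (p ++ x :: y :: rest).getD p.length 0 = x := by
        simpa using getD_append_at p (x :: y :: rest) 0 0
      have hg1 : (p ++ x :: y :: rest).getD (p.length + 1) 0 = y := by
        simpa using getD_append_at p (x :: y :: rest) 1 0
      by_cases hyx : y = x
      · -- merge: row[col+1] := 0, append 2*x
        have hstep : fixStep (p ++ x :: y :: rest, acc) p.length
            = (p ++ x :: 0 :: rest, acc ++ [x * 2]) := by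
          rw [fixStep_eval, hg0, hg1, if_pos hyx, set_append_right p (x :: y :: rest) 1]
          rfl
        rw [hstep]
        match rest with
        | [] => simp [mergeCore, hyx]
        | [z] =>
          have hz : z ≠ 0 := hnz z (by simp)
          have g1 : (p ++ [x, 0, z]).getD (p.length + 1) 0 = 0 := by
            simpa using getD_append_at p [x, 0, z] 1 0
          have g2 : (p ++ [x, 0, z]).getD (p.length + 1 + 1) 0 = z := by
            simpa [Nat.add_assoc] using getD_append_at p [x, 0, z] 2 0
          have hL : (p ++ [x, 0, z]).length = p.length + 3 := by simp
          rw [show ([z] : List Int).length = 1 from rfl,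
            show List.range' (p.length + 1) 1 = [p.length + 1] from by simp,
            List.foldl_cons, fixStep_eval, g1, g2, if_neg (fun h => hz h), hL,
            if_pos (show p.length + 1 = p.length + 3 - 2 from by omega),
            if_neg (show ¬ (0 : Int) ≠ 0 from by simp)]
          simp [mergeCore, hyx]
        | z :: w :: r =>
          have hz : z ≠ 0 := hnz z (by simp)
          have g1 : (p ++ x :: 0 :: z :: w :: r).getD (p.length + 1) 0 = 0 := by
            simpa using getD_append_at p (x :: 0 :: z :: w :: r) 1 0
          have g2 : (p ++ x :: 0 :: z :: w :: r).getD (p.length + 1 + 1) 0 = z := by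
            simpa [Nat.add_assoc] using getD_append_at p (x :: 0 :: z :: w :: r) 2 0
          have hL : (p ++ x :: 0 :: z :: w :: r).length = p.length + (r.length + 4) := by
            simp
          rw [show ((z :: w :: r : List Int)).length = (r.length + 1) + 1 from by
              simp only [List.length_cons],
            List.range'_succ, List.foldl_cons, fixStep_eval, g1, g2,
            if_neg (fun h => hz h), hL,
            if_neg (show ¬ p.length + 1 = p.length + (r.length + 4) - 2 from by omega),
            if_neg (show ¬ (0 : Int) ≠ 0 from by simp)]
          rw [show p ++ x :: 0 :: z :: w :: r = (p ++ [x, 0]) ++ z :: w :: r from by simp,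
            show (p.length + 1 + 1 : Nat) = (p ++ [x, 0]).length from by simp,
            show (r.length + 1 : Nat) = r.length + 2 - 1 from by omega]
          rw [IH (r.length + 2) (by simp only [List.length_cons]; omega) (z :: w :: r)
            (p ++ [x, 0]) (acc ++ [x * 2]) (by simp) (by omega)
            (fun t ht => hnz t (by simp at ht ⊢; tauto))]
          simp [mergeCore, hyx]
      · -- no merge: append x, and also y when at the final column
        match rest with
        | [] =>
          have hL : (p ++ [x, y]).length = p.length + 2 := by simp
          rw [fixStep_eval, hg0, hg1, if_neg hyx, hL,
            if_pos (show p.length = p.length + 2 - 2 from by omega), if_pos hx]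
          simp [mergeCore, hyx]
        | z :: r =>
          have hL : (p ++ x :: y :: z :: r).length = p.length + (r.length + 3) := by
            simp
          rw [fixStep_eval, hg0, hg1, if_neg hyx, hL,
            if_neg (show ¬ p.length = p.length + (r.length + 3) - 2 from by omega),
            if_pos hx]
          rw [show p ++ x :: y :: z :: r = (p ++ [x]) ++ y :: z :: r from by simp,
            show (p.length + 1 : Nat) = (p ++ [x]).length from by simp,
            show ((z :: r : List Int)).length = r.length + 2 - 1 from by
              simp only [List.length_cons]; omega]
          rw [IH (r.length + 2) (by simp only [List.length_cons]; omega) (y :: z :: r)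
            (p ++ [x]) (acc ++ [x]) (by simp) (by omega)
            (fun t ht => hnz t (by simp at ht ⊢; tauto))]
          simp [mergeCore, hyx]

theorem fixLoop_len (cols : List Nat) : ∀ st : List Int × List Int,
    ((cols.foldl fixStep st).1).length = st.1.length := by
  induction cols with
  | nil => intro st; rfl
  | cons c cols ih =>
    intro st
    rw [List.foldl_cons, ih, fixStep_eval]
    split_ifs <;> simp

theorem fixCore_eq (t : List Int) (hnz : ∀ x ∈ t, x ≠ 0) :
    fixCore t = mergeCore t ++ List.replicate (4 - (mergeCore t).length) 0 := by
  match t with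
  | [] => decide
  | [x] => simp [fixCore, mergeCore]
  | x :: y :: rest =>
    have hloop := fixLoop (rest.length + 2) (x :: y :: rest) [] [] (by simp) (by omega) hnz
    simp only [List.length_nil, List.nil_append] at hloop
    rw [show rest.length + 2 - 1 = rest.length + 1 from by omega] at hloop
    have hlen := fixLoop_len (List.range' 0 (rest.length + 1)) (x :: y :: rest, [])
    unfold fixCore
    rw [List.range_eq_range']
    simp only [List.length_cons, Nat.add_sub_cancel]
    rw [if_neg (show ¬ ((List.range' 0 (rest.length + 1)).foldl fixStep
        (x :: y :: rest, ([] : List Int))).1.length = 1 from by rw [hlen]; simp),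
      hloop]

theorem fixRow_eq_mergeLeft : fixRow = mergeLeft := by
  funext row
  unfold fixRow mergeLeft
  rw [fixCore_eq]
  intro x hx
  simpa using (List.of_mem_filter hx)

theorem valid_eq (nb g : List (List Int)) :
    decide (nb = g) = !(nb != g) := by
  by_cases h : nb = g <;> simp [h]

-- ===== VERDICT (by name: the statement is the Claim_ definition above) =====
theorem process_move_spec : Claim_equal_process_move := by
  intro grid move _
  unfold Spec_process_move process_move process_move_alt rotate rotB mergeRight
  simp only [fixRow_eq_mergeLeft]
  by_cases m0 : move = 0
  · simp [m0, valid_eq]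
  · by_cases m1 : move = 1
    · simp [m0, m1, List.range_succ, valid_eq]
    · by_cases m2 : move = 2
      · simp [m0, m1, m2, valid_eq]
      · simp [m0, m1, m2, List.range_succ, valid_eq]
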